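-- pv_equiv track=rewrite | github.com/miayangy/ToUniverse | converter.py | extract_entries
-- ===== SOURCE A (Python) =====
-- def extract_entries(text):
--     # 分割文本成多个条目
--     entries = []
--
--     # 首先按换行分割
--     lines = [line.strip() for line in text.split('\n') if line.strip()]
--
--     current_entry = []
--     for line in lines:
--         # 如果这行看起来像是新条目的开始（包含URL），且当前条目不为空
--         if 'http' in line and current_entry:
--             entries.append(' '.join(current_entry))
--             current_entry = [line]
--         else:
--             current_entry.append(line)
--
--     # 添加最后一个条目
--     if current_entry:
--         entries.append(' '.join(current_entry))
--
--     return entries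
-- ===== SOURCE B (Python) =====
-- def extract_entries(text):
--     # Index-based chunking: find each entry's end boundary, slice and join.
--     lines = [line.strip() for line in text.split('\n') if line.strip()]
--     entries = []
--     n = len(lines)
--     i = 0
--     while i < n:
--         j = i + 1
--         while j < n and 'http' not in lines[j]:
--             j += 1
--         entries.append(' '.join(lines[i:j]))
--         i = j
--     return entries
-- ===== Notes on version B (the rewrite author's own statement) =====
-- stated objective: alternative
-- what changed: Replaces A's running current_entry/entries accumulator pair with an index-based boundary scan: for each chunk start it advances an index to the next URL-marker line and emits one slice-join, so no per-line list accumulator is maintained.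
import Mathlib
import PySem

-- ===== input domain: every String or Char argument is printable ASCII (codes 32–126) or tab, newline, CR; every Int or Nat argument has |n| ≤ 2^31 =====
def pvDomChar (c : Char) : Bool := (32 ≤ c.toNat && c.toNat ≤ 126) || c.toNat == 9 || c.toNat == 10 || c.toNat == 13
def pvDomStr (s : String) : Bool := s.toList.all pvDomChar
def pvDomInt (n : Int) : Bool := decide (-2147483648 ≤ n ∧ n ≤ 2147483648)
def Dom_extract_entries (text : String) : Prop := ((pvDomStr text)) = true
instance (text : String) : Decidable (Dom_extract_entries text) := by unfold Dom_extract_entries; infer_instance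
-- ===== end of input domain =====

-- B replaces A's running current_entry/entries accumulator with an index-based boundary
-- scan that slices each chunk out at once (alternative decomposition, same cost).

-- ===== PORT A =====
-- the loop body of A: state = (entries, current_entry)
def pvStepA (st : List String × List String) (line : String) : List String × List String :=
  if PySem.Str.isIn "http" line && !st.2.isEmpty then
    (st.1 ++ [PySem.Str.join " " st.2], [line])
  else
    (st.1, st.2 ++ [line])

-- A's trailing "if current_entry: entries.append(' '.join(current_entry))"
def pvFin (st : List String × List String) : List String :=
  if st.2.isEmpty then st.1 else st.1 ++ [PySem.Str.join " " st.2]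

def extract_entries (text : String) : List String :=
  pvFin (((((PySem.Str.split? text "\n").getD []).filter
      (fun line => !(PySem.Str.strip line == ""))).map
      (fun line => PySem.Str.strip line)).foldl pvStepA ([], []))

-- ===== PORT B =====
-- the inner while: advance j to the next line containing 'http' (or to the end)
def pvFindJ (lines : List String) (j : Nat) : Nat :=
  if h : j < lines.length then
    if !PySem.Str.isIn "http" lines[j] then pvFindJ lines (j + 1) else j
  else j
termination_by lines.length - j

theorem pvFindJ_ge (lines : List String) (j : Nat) : j ≤ pvFindJ lines j := by
  fun_induction pvFindJ lines j with
  | case1 j h hp ih => omega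
  | case2 j h hp => omega
  | case3 j h => omega

-- the outer while: emit ' '.join(lines[i:j]) per chunk
def pvLoopB (lines : List String) (entries : List String) (i : Nat) : List String :=
  if h : i < lines.length then
    let j := pvFindJ lines (i + 1)
    pvLoopB lines
      (entries ++ [PySem.Str.join " " (PySem.List.slice lines (some (i : Int)) (some (j : Int)))]) j
  else entries
termination_by lines.length - i
decreasing_by have := pvFindJ_ge lines (i + 1); omega

def extract_entries_alt (text : String) : List String :=
  pvLoopB ((((PySem.Str.split? text "\n").getD []).filter
      (fun line => !(PySem.Str.strip line == ""))).map
      (fun line => PySem.Str.strip line)) [] 0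

-- ===== PRECONDITION & SPEC =====
def Spec_extract_entries (text : String) (out : List String) : Prop := out = extract_entries_alt text
instance (text : String) (out : List String) : Decidable (Spec_extract_entries text out) := by unfold Spec_extract_entries; infer_instance

-- ===== CLAIM (what is proved, stated in full; the proofs are below) =====
def Claim_equal_extract_entries : Prop := ∀ (text : String), Dom_extract_entries text → Spec_extract_entries text (extract_entries text)

-- ===== LEMMAS AND PROOFS =====

-- the chunk-boundary predicate ('http' not in line), named once for the proofs
def pvP (s : String) : Bool := !PySem.Str.isIn "http" s

-- the common chunk decomposition both programs compute
def pvGroup : List String → List String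
  | [] => []
  | l :: rest =>
      PySem.Str.join " " (l :: rest.takeWhile pvP) :: pvGroup (rest.dropWhile pvP)
termination_by ls => ls.length
decreasing_by
  exact Nat.lt_succ_of_le (List.length_dropWhile_le _ _)

theorem pv_take_length_takeWhile {α : Type} (p : α → Bool) (xs : List α) :
    xs.take (xs.takeWhile p).length = xs.takeWhile p := by
  induction xs with
  | nil => rfl
  | cons x xs ih => by_cases h : p x <;> simp [List.takeWhile_cons, h, ih]

theorem pv_dropWhile_eq_drop {α : Type} (p : α → Bool) (xs : List α) :
    xs.dropWhile p = xs.drop (xs.takeWhile p).length := by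
  induction xs with
  | nil => rfl
  | cons x xs ih => by_cases h : p x <;> simp [List.takeWhile_cons, List.dropWhile_cons, h, ih]

theorem pvFindJ_eq (lines : List String) (j : Nat) :
    pvFindJ lines j = j + ((lines.drop j).takeWhile pvP).length := by
  fun_induction pvFindJ lines j with
  | case1 j h hp ih =>
      rw [ih, ← List.getElem_cons_drop h, List.takeWhile_cons,
        if_pos (show pvP lines[j] = true from hp)]
      simp only [List.length_cons]
      omega
  | case2 j h hp =>
      rw [← List.getElem_cons_drop h, List.takeWhile_cons,
        if_neg (show ¬ pvP lines[j] = true from hp)]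
      simp
  | case3 j h =>
      rw [List.drop_eq_nil_of_le (by omega)]
      simp

theorem pvLoopB_eq (lines : List String) (entries : List String) (i : Nat) :
    pvLoopB lines entries i = entries ++ pvGroup (lines.drop i) := by
  fun_induction pvLoopB lines entries i with
  | case1 entries i h j ih =>
      rw [ih]
      have hj : j = (i + 1) + ((lines.drop (i + 1)).takeWhile pvP).length :=
        pvFindJ_eq lines (i + 1)
      have hdropi : lines.drop i = lines[i] :: lines.drop (i + 1) :=
        (List.getElem_cons_drop h).symm
      have hslice : PySem.List.slice lines (some (i : Int)) (some (j : Int)) =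
          lines[i] :: (lines.drop (i + 1)).takeWhile pvP := by
        rw [PySem.List.slice_natCast lines i j, hdropi, hj]
        have harith : (i + 1) + ((lines.drop (i + 1)).takeWhile pvP).length - i
            = ((lines.drop (i + 1)).takeWhile pvP).length + 1 := by omega
        rw [harith, List.take_succ_cons, pv_take_length_takeWhile]
      have hdropj : lines.drop j = (lines.drop (i + 1)).dropWhile pvP := by
        rw [pv_dropWhile_eq_drop, List.drop_drop, hj]
      have hgroup : pvGroup (lines.drop i) =
          PySem.Str.join " " (lines[i] :: (lines.drop (i + 1)).takeWhile pvP) ::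
            pvGroup ((lines.drop (i + 1)).dropWhile pvP) := by
        rw [hdropi, pvGroup]
      rw [hslice, hdropj, hgroup]
      simp
  | case2 entries i h =>
      rw [List.drop_eq_nil_of_le (by omega)]
      simp [pvGroup]

-- A's fold, started mid-chunk with a nonempty current entry, computes the chunk decomposition
theorem pvFoldA_eq (ls : List String) :
    ∀ (entries cur : List String), cur ≠ [] →
    pvFin (ls.foldl pvStepA (entries, cur)) =
      entries ++ (PySem.Str.join " " (cur ++ ls.takeWhile pvP) :: pvGroup (ls.dropWhile pvP)) := by
  induction ls with
  | nil =>
      intro entries cur hc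
      simp [pvFin, pvGroup, List.isEmpty_iff, hc]
  | cons l t ih =>
      intro entries cur hc
      cases hp : PySem.Str.isIn "http" l with
      | true =>
          have hstep : pvStepA (entries, cur) l = (entries ++ [PySem.Str.join " " cur], [l]) := by
            unfold pvStepA
            rw [hp]
            simp [List.isEmpty_iff, hc]
          have hP : pvP l = false := by simp only [pvP, hp]; rfl
          rw [List.foldl_cons, hstep, ih _ [l] (by simp)]
          simp [List.takeWhile_cons, List.dropWhile_cons, hP, pvGroup]
      | false =>
          have hstep : pvStepA (entries, cur) l = (entries, cur ++ [l]) := by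
            unfold pvStepA
            rw [hp]
            simp
          have hP : pvP l = true := by simp only [pvP, hp]; rfl
          rw [List.foldl_cons, hstep, ih _ (cur ++ [l]) (by simp)]
          simp [List.takeWhile_cons, List.dropWhile_cons, hP]

theorem pvA_eq_group (ls : List String) :
    pvFin (ls.foldl pvStepA ([], [])) = pvGroup ls := by
  cases ls with
  | nil => simp [pvFin, pvGroup]
  | cons l t =>
      have hstep : pvStepA ([], ([] : List String)) l = ([], [l]) := by
        simp [pvStepA]
      rw [List.foldl_cons, hstep, pvFoldA_eq t [] [l] (by simp), pvGroup]
      simp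

-- ===== VERDICT (by name: the statement is the Claim_ definition above) =====
theorem extract_entries_spec : Claim_equal_extract_entries := by
  intro text _
  unfold Spec_extract_entries extract_entries extract_entries_alt
  rw [pvLoopB_eq, pvA_eq_group]
  simp
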